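-- pv_equiv track=rewrite | github.com/zlab-princeton/vero | vero-eval/lmms_eval/tasks/_task_utils/mcq_answer_extractor.py | can_infer_option
-- ===== SOURCE A (Python) =====
-- from typing import Any, Dict, Iterable, Optional
--
-- def _count_choice(splits: Iterable[str], choices: Iterable[str], prefix: str = "", suffix: str = "") -> int:
--     count = 0
--     for choice in choices:
--         if f"{prefix}{choice}{suffix}" in splits:
--             count += 1
--     return count
--
-- def can_infer_option(answer: str, choices: Iterable[str]) -> Optional[str]:
--     if not isinstance(answer, str):
--         return None
--
--     reject_to_answer = [
--         "Sorry, I can't help with images of people yet.",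
--         "I can't process this file.",
--         "I'm sorry, but without the image provided",
--         "Cannot determine the answer",
--     ]
--     for err in reject_to_answer:
--         if err in answer:
--             return "Z"
--
--     answer_mod = answer
--     chars = ".()[],:;!*#{}"
--     for char in chars:
--         answer_mod = answer_mod.replace(char, " ")
--
--     splits = [part.strip() for part in answer_mod.split() if part.strip()]
--     count = _count_choice(splits, choices)
--
--     if count == 1:
--         for ch in choices:
--             if "A" in splits and len(splits) > 3:
--                 return None
--             if ch in splits:
--                 return ch
--     elif count == 0 and _count_choice(splits, {"Z", ""}) == 1:
--         return "Z"
--     return None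
-- ===== SOURCE B (Python) =====
-- from typing import Iterable, Optional
--
-- _REJECT_MARKERS = (
--     "Sorry, I can't help with images of people yet.",
--     "I can't process this file.",
--     "I'm sorry, but without the image provided",
--     "Cannot determine the answer",
-- )
--
-- _SEPS = set(".()[],:;!*#{}")
--
-- def can_infer_option(answer: str, choices: Iterable[str]) -> Optional[str]:
--     if not isinstance(answer, str):
--         return None
--     if any(err in answer for err in _REJECT_MARKERS):
--         return "Z"
--     # single-pass tokenizer: punctuation and whitespace are both separators
--     splits = []
--     token = []
--     for c in answer + " ":
--         if c in _SEPS or c.isspace():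
--             if token:
--                 splits.append("".join(token))
--                 token = []
--         else:
--             token.append(c)
--     tokens = set(splits)
--     matched = [c for c in choices if c in tokens]
--     if len(matched) == 1:
--         return None if ("A" in tokens and len(splits) > 3) else matched[0]
--     if not matched and "Z" in tokens:
--         return "Z"
--     return None
-- ===== Notes on version B (the rewrite author's own statement) =====
-- stated objective: alternative
-- what changed: A's 13 sequential str.replace passes followed by split/strip/filter and a count-then-rescan over choices are replaced by a single-pass character tokenizer (punctuation and whitespace are both separators), a token set built once, and one scan of choices producing a matched list whose length drives the decision.
import Mathlib
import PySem

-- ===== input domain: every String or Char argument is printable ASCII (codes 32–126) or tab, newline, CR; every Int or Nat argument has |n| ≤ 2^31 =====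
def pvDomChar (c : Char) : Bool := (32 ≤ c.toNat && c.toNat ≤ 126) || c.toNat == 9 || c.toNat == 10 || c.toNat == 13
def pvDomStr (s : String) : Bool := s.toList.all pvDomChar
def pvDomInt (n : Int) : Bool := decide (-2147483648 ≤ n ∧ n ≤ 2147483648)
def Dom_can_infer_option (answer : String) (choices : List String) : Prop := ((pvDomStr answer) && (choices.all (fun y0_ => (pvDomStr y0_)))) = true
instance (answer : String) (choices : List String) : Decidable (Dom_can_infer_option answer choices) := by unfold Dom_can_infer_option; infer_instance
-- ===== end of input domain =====

-- B replaces A's 13 sequential replace passes + split/strip/filter and count-then-rescan by a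
-- single-pass character tokenizer (punctuation and whitespace both separate), a token set built
-- once, and one scan of choices producing the matched list whose length drives the decision.

-- ===== PORT A =====
def pvRejects : List String :=
  ["Sorry, I can't help with images of people yet.",
   "I can't process this file.",
   "I'm sorry, but without the image provided",
   "Cannot determine the answer"]

-- 'for err in reject_to_answer: if err in answer: return "Z"'
def pvRejectScan : List String → String → Bool
  | [], _ => false
  | e :: rest, ans => if PySem.Str.isIn e ans then true else pvRejectScan rest ans

-- 'for char in chars: answer_mod = answer_mod.replace(char, " ")'
def pvReplaceAll : List Char → String → String
  | [], s => s
  | c :: rest, s => pvReplaceAll rest (PySem.Str.replace s (String.ofList [c]) " ")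

-- _count_choice: the f-string "{prefix}{choice}{suffix}" is string concatenation (exact)
def pvCountChoice (splits : List String) (choices : List String) (pre suf : String) : Int :=
  choices.foldl (fun count choice => if (pre ++ choice ++ suf) ∈ splits then count + 1 else count) 0

-- the 'for ch in choices' loop of the count == 1 branch
def pvPickLoop : List String → List String → Option String
  | [], _ => none
  | ch :: rest, splits =>
      if "A" ∈ splits ∧ 3 < splits.length then none
      else if ch ∈ splits then some ch
      else pvPickLoop rest splits

def can_infer_option (answer : String) (choices : List String) : Option String :=
  if pvRejectScan pvRejects answer then some "Z"
  else
    let answer_mod := pvReplaceAll ".()[],:;!*#{}".toList answer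
    let splits := ((PySem.Str.split₀ answer_mod).map PySem.Str.strip).filter (fun p => p ≠ "")
    let count := pvCountChoice splits choices "" ""
    if count = 1 then pvPickLoop choices splits
    else if count = 0 ∧ pvCountChoice splits (PySem.Set.ofList ["Z", ""]) "" "" = 1 then some "Z"
    else none

-- ===== PORT B =====
def pvSeps : List Char := ".()[],:;!*#{}".toList      -- _SEPS

-- 'c in _SEPS or c.isspace()'
def pvIsSep (c : Char) : Bool := pvSeps.contains c || PySem.Chars.isspace c

-- one step of the tokenizer loop: state = (splits, token)
def pvTokStep (st : List String × List Char) (c : Char) : List String × List Char :=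
  if pvIsSep c then (if st.2.isEmpty then st.1 else st.1 ++ [String.ofList st.2], [])
  else (st.1, st.2 ++ [c])

def can_infer_option_alt (answer : String) (choices : List String) : Option String :=
  if pvRejects.any (fun err => PySem.Str.isIn err answer) then some "Z"
  else
    let splits := ((answer.toList ++ [' ']).foldl pvTokStep ([], [])).1
    let tokens := PySem.Set.ofList splits
    let matched := choices.filter (fun c => PySem.Set.contains tokens c)
    if matched.length = 1 then
      if PySem.Set.contains tokens "A" = true ∧ 3 < splits.length then none else matched.head?
    else if matched.isEmpty ∧ PySem.Set.contains tokens "Z" = true then some "Z"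
    else none

-- ===== PRECONDITION & SPEC =====
def Spec_can_infer_option (answer : String) (choices : List String) (out : Option String) : Prop := out = can_infer_option_alt answer choices
instance (answer : String) (choices : List String) (out : Option String) : Decidable (Spec_can_infer_option answer choices out) := by unfold Spec_can_infer_option; infer_instance

-- ===== CLAIM (what is proved, stated in full; the proofs are below) =====
def Claim_equal_can_infer_option : Prop := ∀ (answer : String) (choices : List String), Dom_can_infer_option answer choices → Spec_can_infer_option answer choices (can_infer_option answer choices)

-- ===== LEMMAS AND PROOFS =====

-- proof-only: the per-character effect of A's replace cascade
def pvNorm (c : Char) : Char := if c ∈ pvSeps then ' ' else c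

-- the reject scan is List.any
theorem pvRejectScan_eq_any (l : List String) (ans : String) :
    pvRejectScan l ans = l.any (fun e => PySem.Str.isIn e ans) := by
  induction l with
  | nil => rfl
  | cons e rest ih =>
    rw [pvRejectScan]
    by_cases h : PySem.Str.isIn e ans = true <;> simp [ih]

-- str.replace with a single-character pattern is a character map
theorem replace_single (x : Char) (l : List Char) :
    PySem.Chars.replace l [x] [' '] = l.map (fun c => if c = x then ' ' else c) := by
  have go : ∀ (fuel : Nat) (l : List Char) (acc : List Char), l.length ≤ fuel →
      PySem.Chars.replace.go [x] [' '] fuel l acc =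
        acc.reverse ++ l.map (fun c => if c = x then ' ' else c) := by
    intro fuel
    induction fuel with
    | zero =>
      intro l acc h
      have : l = [] := List.length_eq_zero_iff.mp (Nat.le_zero.mp h)
      subst this; simp [PySem.Chars.replace.go]
    | succ n ih =>
      intro l acc h
      cases l with
      | nil => simp [PySem.Chars.replace.go]
      | cons c t =>
        rw [PySem.Chars.replace.go]
        by_cases hc : c = x
        · subst hc
          have hp : [c].isPrefixOf (c :: t) = true := by simp [List.isPrefixOf]
          rw [if_pos hp]
          have hd : List.drop ([c] : List Char).length (c :: t) = t := rfl
          rw [hd, ih t _ (by simpa using h)]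
          simp
        · have hp : [x].isPrefixOf (c :: t) = false := by
            simp [List.isPrefixOf]; exact fun h' => absurd h'.symm hc
          simp only [hp, Bool.false_eq_true, if_false]
          rw [ih t _ (by simpa using h)]
          simp [hc]
  unfold PySem.Chars.replace
  simp only [List.isEmpty_cons, Bool.false_eq_true, if_false]
  rw [go l.length l [] le_rfl]
  simp

-- the replace cascade maps every punctuation character to a space
theorem pvReplaceAll_toList (ps : List Char) (s : String) (hsp : ' ' ∉ ps) :
    (pvReplaceAll ps s).toList = s.toList.map (fun c => if c ∈ ps then ' ' else c) := by
  induction ps generalizing s with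
  | nil => simp [pvReplaceAll]
  | cons p rest ih =>
    rw [pvReplaceAll, ih _ (fun h => hsp (List.mem_cons_of_mem _ h))]
    have ht : (PySem.Str.replace s (String.ofList [p]) " ").toList =
        s.toList.map (fun c => if c = p then ' ' else c) := by
      unfold PySem.Str.replace
      rw [String.toList_ofList]
      have h1 : (String.ofList [p]).toList = [p] := String.toList_ofList
      have h2 : (" " : String).toList = [' '] := rfl
      rw [h1, h2, replace_single]
    rw [ht, List.map_map]
    apply List.map_congr_left
    intro c _
    by_cases hc : c = p
    · subst hc
      simp only [Function.comp_apply, List.mem_cons, true_or, if_pos]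
      have : ' ' ∉ rest := fun h => hsp (List.mem_cons_of_mem _ h)
      simp [this]
    · simp only [Function.comp_apply, if_neg hc, List.mem_cons]
      by_cases hr : c ∈ rest <;> simp [hr, hc]

-- the separator test is the whitespace test after normalisation
theorem pvIsSep_eq (c : Char) : PySem.Chars.isspace (pvNorm c) = pvIsSep c := by
  unfold pvNorm pvIsSep
  by_cases h : c ∈ pvSeps
  · rw [if_pos h]
    have h2 : pvSeps.contains c = true := by simpa using h
    rw [h2]
    simp only [Bool.true_or]
    decide
  · rw [if_neg h]
    have h2 : pvSeps.contains c = false := by simpa using h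
    rw [h2]
    simp

-- B's single-pass tokenizer computes str.split() of the normalised string
theorem tok_go (cs : List Char) :
    ∀ (tok : List Char) (acc : List (List Char)),
      (List.foldl pvTokStep (acc.reverse.map String.ofList, tok) (cs ++ [' '])).1 =
        (PySem.Chars.split₀.go (cs.map pvNorm) tok.reverse acc).map String.ofList := by
  induction cs with
  | nil =>
    intro tok acc
    have hsp : pvIsSep ' ' = true := by decide
    simp only [List.nil_append, List.foldl_cons, List.foldl_nil, List.map_nil]
    rw [PySem.Chars.split₀.go]
    by_cases ht : tok = []
    · subst ht
      simp [pvTokStep, hsp]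
    · have hstep : pvTokStep (acc.reverse.map String.ofList, tok) ' '
          = (acc.reverse.map String.ofList ++ [String.ofList tok], []) := by
        simp [pvTokStep, hsp, ht]
      rw [hstep]
      rw [if_neg (by simp only [List.isEmpty_iff, List.reverse_eq_nil_iff]; exact ht)]
      simp
  | cons c rest ih =>
    intro tok acc
    simp only [List.cons_append, List.foldl_cons, List.map_cons]
    rw [PySem.Chars.split₀.go, pvIsSep_eq]
    by_cases hs : pvIsSep c = true
    · rw [if_pos hs]
      by_cases ht : tok = []
      · subst ht
        have hstep : pvTokStep (acc.reverse.map String.ofList, []) c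
            = (acc.reverse.map String.ofList, []) := by
          simp [pvTokStep, hs]
        rw [hstep]
        simp only [List.reverse_nil, List.isEmpty_nil, if_true]
        exact ih [] acc
      · have hstep : pvTokStep (acc.reverse.map String.ofList, tok) c
            = (acc.reverse.map String.ofList ++ [String.ofList tok], []) := by
          simp [pvTokStep, hs, ht]
        rw [hstep]
        rw [if_neg (by simp only [List.isEmpty_iff, List.reverse_eq_nil_iff]; exact ht)]
        rw [List.reverse_reverse]
        have := ih [] (tok :: acc)
        simp only [List.reverse_nil, List.reverse_cons, List.map_append, List.map_cons,
          List.map_nil] at this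
        simpa using this
    · rw [if_neg hs]
      have hn : pvNorm c = c := by
        unfold pvNorm
        rw [if_neg]
        intro hm
        apply hs
        unfold pvIsSep
        simp [hm]
      rw [hn]
      have hstep : pvTokStep (acc.reverse.map String.ofList, tok) c
          = (acc.reverse.map String.ofList, tok ++ [c]) := by
        simp [pvTokStep, hs]
      rw [hstep]
      have := ih (tok ++ [c]) acc
      simpa using this

-- every part produced by Python's str.split() is nonempty and whitespace-free
theorem split₀_go_parts (s : List Char) :
    ∀ (cur : List Char) (acc : List (List Char)),
      (∀ c ∈ cur, PySem.Chars.isspace c = false) →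
      (∀ p ∈ acc, p ≠ [] ∧ ∀ c ∈ p, PySem.Chars.isspace c = false) →
      ∀ p ∈ PySem.Chars.split₀.go s cur acc, p ≠ [] ∧ ∀ c ∈ p, PySem.Chars.isspace c = false := by
  induction s with
  | nil =>
    intro cur acc hcur hacc p hp
    by_cases hc : cur.isEmpty = true
    · simp [PySem.Chars.split₀.go, hc] at hp
      exact hacc p hp
    · simp [PySem.Chars.split₀.go, hc] at hp
      rcases hp with hp | hp
      · exact hacc p hp
      · subst hp
        refine ⟨by simpa [List.isEmpty_iff] using hc, ?_⟩
        intro c hc'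
        exact hcur c (by simpa using hc')
  | cons c rest ih =>
    intro cur acc hcur hacc p hp
    by_cases hs : PySem.Chars.isspace c = true
    · by_cases hc : cur.isEmpty = true
      · rw [PySem.Chars.split₀.go] at hp
        simp only [hs, hc, if_true] at hp
        exact ih [] acc (by simp) hacc p hp
      · rw [PySem.Chars.split₀.go] at hp
        simp only [hs, hc, if_true, Bool.false_eq_true, if_false] at hp
        refine ih [] (cur.reverse :: acc) (by simp) ?_ p hp
        intro q hq
        rcases List.mem_cons.mp hq with hq | hq
        · subst hq
          refine ⟨by simpa [List.isEmpty_iff] using hc, ?_⟩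
          intro d hd
          exact hcur d (by simpa using hd)
        · exact hacc q hq
    · rw [PySem.Chars.split₀.go] at hp
      simp only [hs, Bool.false_eq_true, if_false] at hp
      refine ih (c :: cur) acc ?_ hacc p hp
      intro d hd
      rcases List.mem_cons.mp hd with hd | hd
      · subst hd; simpa using hs
      · exact hcur d hd

theorem split₀_parts (cs : List Char) :
    ∀ p ∈ PySem.Chars.split₀ cs, p ≠ [] ∧ ∀ c ∈ p, PySem.Chars.isspace c = false := by
  intro p hp
  exact split₀_go_parts cs [] [] (by simp) (by simp) p hp

-- strip is the identity on a whitespace-free list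
theorem strip_eq_self (p : List Char) (h : ∀ c ∈ p, PySem.Chars.isspace c = false) :
    PySem.Chars.strip p = p := by
  have hl : PySem.Chars.lstrip p = p := by
    unfold PySem.Chars.lstrip
    cases p with
    | nil => rfl
    | cons c t => simp [List.dropWhile, h c (by simp)]
  have hr : PySem.Chars.rstrip p = p := by
    unfold PySem.Chars.rstrip
    cases hpr : p.reverse with
    | nil =>
      simpa using (List.reverse_eq_nil_iff.mp hpr).symm
    | cons c t =>
      have hc : c ∈ p := by
        have : c ∈ p.reverse := by rw [hpr]; simp
        simpa using this
      simp only [List.dropWhile_cons, h c hc, Bool.false_eq_true, if_false]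
      rw [← hpr, List.reverse_reverse]
  unfold PySem.Chars.strip
  rw [hl, hr]

-- the strip-and-drop-empties comprehension is the identity on str.split()'s output
theorem splits_eq (am : String) :
    ((PySem.Str.split₀ am).map PySem.Str.strip).filter (fun p => p ≠ "") =
      PySem.Str.split₀ am := by
  unfold PySem.Str.split₀
  rw [List.map_map]
  have h1 : ∀ p ∈ PySem.Chars.split₀ am.toList,
      (PySem.Str.strip ∘ String.ofList) p = String.ofList p := by
    intro p hp
    have hws := (split₀_parts am.toList p hp).2
    show PySem.Str.strip (String.ofList p) = String.ofList p
    unfold PySem.Str.strip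
    rw [String.toList_ofList, strip_eq_self p hws]
  rw [List.map_congr_left h1]
  apply List.filter_eq_self.mpr
  intro q hq
  simp only [List.mem_map] at hq
  obtain ⟨p, hp, rfl⟩ := hq
  have hne := (split₀_parts am.toList p hp).1
  have : ¬ (String.ofList p = "") := fun hcontra =>
    hne (by simpa using congrArg String.toList hcontra)
  simp [this]

-- no part of str.split() is the empty string
theorem empty_not_mem_split₀ (am : String) : "" ∉ PySem.Str.split₀ am := by
  intro h
  unfold PySem.Str.split₀ at h
  simp only [List.mem_map] at h
  obtain ⟨p, hp, hq⟩ := h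
  exact (split₀_parts am.toList p hp).1 (by simpa using congrArg String.toList hq.symm)

-- membership in B's token set is membership in the splits list
theorem contains_ofList (S : List String) (x : String) :
    PySem.Set.contains (PySem.Set.ofList S) x = decide (x ∈ S) := by
  by_cases h : x ∈ S
  · simp [PySem.Set.mem_ofList, h]
  · simp only [h, decide_false]
    rw [← Bool.not_eq_true]
    intro hc
    exact h (by simpa [PySem.Set.mem_ofList] using (PySem.Set.contains_iff _ _).mp hc)

-- _count_choice with empty prefix/suffix counts the matching choices
theorem pvCountChoice_aux (S C : List String) (n : Int) :
    C.foldl (fun count choice => if ("" ++ choice ++ "") ∈ S then count + 1 else count) n =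
      n + ((C.filter (fun c => c ∈ S)).length : Int) := by
  induction C generalizing n with
  | nil => simp
  | cons c rest ih =>
    have hkey : ("" ++ c ++ "") = c := by rw [String.empty_append, String.append_empty]
    rw [List.foldl_cons, hkey, List.filter_cons]
    by_cases h : c ∈ S
    · rw [if_pos h, if_pos (by simpa using h), ih]
      simp only [List.length_cons]
      push_cast; ring
    · rw [if_neg h, if_neg (by simpa using h), ih]

theorem pvCountChoice_eq (S C : List String) :
    pvCountChoice S C "" "" = ((C.filter (fun c => c ∈ S)).length : Int) := by
  unfold pvCountChoice
  rw [pvCountChoice_aux]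
  simp

-- the count == 1 rescan loop, when the 'A'-guard is off, returns the first matching choice
theorem pvPickLoop_no_guard (C S : List String) (hg : ¬ ("A" ∈ S ∧ 3 < S.length)) :
    pvPickLoop C S = (C.filter (fun c => c ∈ S)).head? := by
  induction C with
  | nil => rfl
  | cons c rest ih =>
    rw [pvPickLoop, if_neg hg, List.filter_cons]
    by_cases h : c ∈ S
    · rw [if_pos h, if_pos (by simpa using h)]; rfl
    · rw [if_neg h, if_neg (by simpa using h), ih]

theorem pvPickLoop_guard (C S : List String) (hC : C ≠ [])
    (hg : "A" ∈ S ∧ 3 < S.length) : pvPickLoop C S = none := by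
  cases C with
  | nil => exact absurd rfl hC
  | cons c rest => rw [pvPickLoop, if_pos hg]

-- the branch structure after splits: A's count-then-rescan equals B's matched-list decision
theorem branches_eq (S C : List String) (hS0 : "" ∉ S) :
    (if pvCountChoice S C "" "" = 1 then pvPickLoop C S
     else if pvCountChoice S C "" "" = 0 ∧
         pvCountChoice S (PySem.Set.ofList ["Z", ""]) "" "" = 1 then some "Z"
     else none)
    = (if (C.filter (fun c => c ∈ S)).length = 1 then
         if "A" ∈ S ∧ 3 < S.length then none else (C.filter (fun c => c ∈ S)).head?
       else if (C.filter (fun c => c ∈ S)).isEmpty ∧ "Z" ∈ S then some "Z"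
       else none) := by
  have hZ : pvCountChoice S (PySem.Set.ofList ["Z", ""]) "" "" =
      if "Z" ∈ S then 1 else 0 := by
    have hset : PySem.Set.ofList ["Z", ""] = ["Z", ""] := by decide
    rw [hset]
    unfold pvCountChoice
    have hkeyZ : ("" ++ "Z" ++ "") = "Z" := by rw [String.empty_append, String.append_empty]
    have hkeyE : ("" ++ "" ++ "") = "" := by rw [String.empty_append, String.append_empty]
    simp only [List.foldl_cons, List.foldl_nil, hkeyZ, hkeyE, hS0]
    by_cases hz : "Z" ∈ S
    · rw [if_pos hz, if_pos hz]; norm_num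
    · rw [if_neg hz, if_neg hz]; norm_num
  rw [pvCountChoice_eq, hZ]
  set M := C.filter (fun c => c ∈ S) with hM
  by_cases h1 : M.length = 1
  · rw [if_pos (by exact_mod_cast h1), if_pos h1]
    have hC : C ≠ [] := by
      intro h
      rw [h] at hM
      simp [hM] at h1
    by_cases hg : "A" ∈ S ∧ 3 < S.length
    · rw [if_pos hg, pvPickLoop_guard C S hC hg]
    · rw [if_neg hg, pvPickLoop_no_guard C S hg]
  · have h1' : ¬ ((M.length : Int) = 1) := by exact_mod_cast h1
    rw [if_neg h1', if_neg h1]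
    by_cases h0 : M = []
    · by_cases hz : "Z" ∈ S
      · rw [if_pos ⟨by simp [h0], by rw [if_pos hz]⟩, if_pos ⟨by simp [h0], hz⟩]
      · rw [if_neg, if_neg]
        · intro hcontra; exact hz hcontra.2
        · intro hcontra
          rw [if_neg hz] at hcontra
          exact absurd hcontra.2 (by norm_num)
    · rw [if_neg, if_neg]
      · intro hcontra
        exact h0 (List.isEmpty_iff.mp hcontra.1)
      · intro hcontra
        have : M.length = 0 := by exact_mod_cast hcontra.1
        exact h0 (List.length_eq_zero_iff.mp this)

-- ===== VERDICT (by name: the statement is the Claim_ definition above) =====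
theorem can_infer_option_spec : Claim_equal_can_infer_option := by
  intro answer choices _
  unfold Spec_can_infer_option can_infer_option can_infer_option_alt
  rw [pvRejectScan_eq_any]
  by_cases hrej : (pvRejects.any fun e => PySem.Str.isIn e answer) = true
  · rw [if_pos hrej, if_pos hrej]
  · rw [if_neg hrej, if_neg hrej]
    -- identify the two splits lists
    have hsplits :
        ((PySem.Str.split₀ (pvReplaceAll ".()[],:;!*#{}".toList answer)).map
            PySem.Str.strip).filter (fun p => p ≠ "") =
          ((answer.toList ++ [' ']).foldl pvTokStep ([], [])).1 := by
      rw [splits_eq]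
      have htok := tok_go answer.toList [] []
      simp only [List.reverse_nil, List.map_nil] at htok
      rw [htok]
      have hmod : (pvReplaceAll ".()[],:;!*#{}".toList answer).toList =
          answer.toList.map pvNorm := by
        rw [pvReplaceAll_toList _ _ (by decide)]
        rfl
      unfold PySem.Str.split₀ PySem.Chars.split₀
      rw [hmod]
    rw [← hsplits]
    set S := ((PySem.Str.split₀ (pvReplaceAll ".()[],:;!*#{}".toList answer)).map
        PySem.Str.strip).filter (fun p => p ≠ "") with hS
    have hS0 : "" ∉ S := by
      rw [hS, splits_eq]
      exact empty_not_mem_split₀ _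
    simp only [contains_ofList]
    have hfilter : choices.filter (fun c => decide (c ∈ S)) =
        choices.filter (fun c => c ∈ S) := rfl
    rw [hfilter]
    simp only [decide_eq_true_eq]
    exact branches_eq S choices hS0
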